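-- pv_equiv track=rewrite | github.com/re-24/myatcode | abc081/b.py | half
-- ===== SOURCE A (Python) =====
-- def half(_a):
--     ret = list()
--     for i in _a:
--         if i % 2 != 0:
--             return None
--         else:
--             ret.append(i//2)
--     return ret
-- ===== SOURCE B (Python) =====
-- def half(_a):
--     a = list(_a)
--     if any(i % 2 for i in a):
--         return None
--     return [i // 2 for i in a]
-- ===== Notes on version B (the rewrite author's own statement) =====
-- stated objective: simpler
-- what changed: Replaces A's single fused loop with early return by two separate passes: an any() validation pass, then a list-comprehension transform.
import Mathlib
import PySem

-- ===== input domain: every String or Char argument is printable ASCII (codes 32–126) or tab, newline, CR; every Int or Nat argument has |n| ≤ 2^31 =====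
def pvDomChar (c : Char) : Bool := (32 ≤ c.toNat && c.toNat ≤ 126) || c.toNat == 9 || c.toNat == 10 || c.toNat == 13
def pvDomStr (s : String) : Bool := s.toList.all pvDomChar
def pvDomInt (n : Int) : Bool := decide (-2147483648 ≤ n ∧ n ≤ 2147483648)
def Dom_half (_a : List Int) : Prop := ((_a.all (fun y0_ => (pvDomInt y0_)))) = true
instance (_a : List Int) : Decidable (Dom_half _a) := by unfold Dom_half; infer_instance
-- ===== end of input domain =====

-- ===== PORT A =====
-- ret = []; for i in _a: if i % 2 != 0: return None else ret.append(i//2); return ret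
def halfLoop (xs : List Int) (ret : List Int) : Option (List Int) :=
  match xs with
  | [] => some ret
  | i :: rest =>
    if PySem.Int.mod i 2 ≠ 0 then none
    else halfLoop rest (ret ++ [PySem.Int.floordiv i 2])

def half (_a : List Int) : Option (List Int) := halfLoop _a []

-- ===== PORT B =====
-- if any(i % 2 for i in a): return None; return [i // 2 for i in a]
def half_alt (_a : List Int) : Option (List Int) :=
  if _a.any (fun i => PySem.Int.mod i 2 ≠ 0) then none
  else some (_a.map (fun i => PySem.Int.floordiv i 2))

-- ===== PRECONDITION & SPEC =====
def Spec_half (_a : List Int) (out : Option (List Int)) : Prop := out = half_alt _a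
instance (_a : List Int) (out : Option (List Int)) : Decidable (Spec_half _a out) := by unfold Spec_half; infer_instance

-- ===== CLAIM (what is proved, stated in full; the proofs are below) =====
def Claim_equal_half : Prop := ∀ (_a : List Int), Dom_half _a → Spec_half _a (half _a)

-- ===== LEMMAS AND PROOFS =====

-- ===== VERDICT (by name: the statement is the Claim_ definition above) =====
theorem halfLoop_eq (xs ret : List Int) :
    halfLoop xs ret =
      if xs.any (fun i => PySem.Int.mod i 2 ≠ 0) then none
      else some (ret ++ xs.map (fun i => PySem.Int.floordiv i 2)) := by
  induction xs generalizing ret with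
  | nil => simp [halfLoop]
  | cons i rest ih =>
    simp only [halfLoop, List.any_cons, List.map_cons]
    by_cases h : i.fmod 2 = 0
    · simp [PySem.Int.mod, h, ih, List.append_assoc]
    · simp [PySem.Int.mod, h]

theorem half_spec : Claim_equal_half := by
  intro _a _
  unfold Spec_half half half_alt
  simp [halfLoop_eq]
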